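-- pv_equiv track=rewrite | github.com/CristianTudor89/AdventOfCode-2021 | Day 18/day18.py | GetFirstPair
-- ===== SOURCE A (Python) =====
-- def GetFirstPair(number):
--     pos = 0
--     while (pos < len(number)):
--         if number[pos] == '[':
--             found = False
--             newPos = pos + 1
--             while (newPos < len(number)):
--                 if number[newPos] == '[':
--                     break
--
--                 if number[newPos] == ']':
--                     found = True
--                     break
--
--                 newPos += 1
--
--             if found:
--                 return [pos, newPos]
--
--         pos += 1
--
--     return [-1, -1]
-- ===== SOURCE B (Python) =====
-- def GetFirstPair(number):
--     last = -1
--     for pos in range(len(number)):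
--         ch = number[pos]
--         if ch == '[':
--             last = pos
--         elif ch == ']' and last != -1:
--             return [last, pos]
--     return [-1, -1]
-- ===== Notes on version B (the rewrite author's own statement) =====
-- stated objective: faster
-- what changed: Replaces A's outer scan with an inner forward bracket scan per '[' by a single left-to-right pass that remembers the index of the most recent '[' and returns at the first ']' that has one.
import Mathlib
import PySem

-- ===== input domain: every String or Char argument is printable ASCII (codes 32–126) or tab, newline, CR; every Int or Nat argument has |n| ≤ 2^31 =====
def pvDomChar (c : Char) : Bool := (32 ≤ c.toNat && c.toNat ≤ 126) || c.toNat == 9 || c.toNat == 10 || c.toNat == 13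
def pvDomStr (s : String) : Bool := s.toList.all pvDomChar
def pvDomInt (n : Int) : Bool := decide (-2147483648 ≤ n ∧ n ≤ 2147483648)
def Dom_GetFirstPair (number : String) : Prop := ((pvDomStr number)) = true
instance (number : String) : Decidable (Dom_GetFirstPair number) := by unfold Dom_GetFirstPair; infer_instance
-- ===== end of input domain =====

-- ===== PORT A =====
-- B is one O(n) pass keeping the index of the most recent '['; A rescans forward from each '['.

-- inner while loop of A: scan forward from index newPos; stop at the first bracket.
def pvInnerA : List Char → Int → (Bool × Int)
  | [], newPos => (false, newPos)
  | c :: rest, newPos =>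
    if c = '[' then (false, newPos)
    else if c = ']' then (true, newPos)
    else pvInnerA rest (newPos + 1)

-- outer while loop of A.
def pvOuterA : List Char → Int → List Int
  | [], _ => [-1, -1]
  | c :: rest, pos =>
    if c = '[' then
      let r := pvInnerA rest (pos + 1)
      if r.1 then [pos, r.2] else pvOuterA rest (pos + 1)
    else pvOuterA rest (pos + 1)

def GetFirstPair (number : String) : List Int := pvOuterA number.toList 0

-- ===== PORT B =====
-- single pass of B: `last` is the index of the most recent '[' (or -1).
def pvLoopB : List Char → Int → Int → List Int
  | [], _, _ => [-1, -1]
  | c :: rest, pos, last =>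
    if c = '[' then pvLoopB rest (pos + 1) pos
    else if c = ']' ∧ last ≠ -1 then [last, pos]
    else pvLoopB rest (pos + 1) last

def GetFirstPair_alt (number : String) : List Int := pvLoopB number.toList 0 (-1)

-- ===== PRECONDITION & SPEC =====
def Spec_GetFirstPair (number : String) (out : List Int) : Prop := out = GetFirstPair_alt number
instance (number : String) (out : List Int) : Decidable (Spec_GetFirstPair number out) := by unfold Spec_GetFirstPair; infer_instance

-- ===== CLAIM (what is proved, stated in full; the proofs are below) =====
def Claim_equal_GetFirstPair : Prop := ∀ (number : String), Dom_GetFirstPair number → Spec_GetFirstPair number (GetFirstPair number)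

-- ===== LEMMAS AND PROOFS =====

-- With a pending '[' at index `last` (≠ -1), B's pass answers what A's inner scan from the
-- same suffix answers: either the next bracket is ']' (return [last, ·]) or A falls back to
-- its outer loop at the breaking position.
theorem pvLoopB_pending (cs : List Char) : ∀ (pos last : Int), last ≠ -1 → 0 ≤ pos →
    pvLoopB cs pos last =
      (let r := pvInnerA cs pos
       if r.1 then [last, r.2] else pvOuterA cs pos) := by
  induction cs with
  | nil => intro pos last _ _; simp [pvLoopB, pvInnerA, pvOuterA]
  | cons c rest ih =>
    intro pos last hlast hpos
    by_cases hc : c = '['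
    · simp only [pvLoopB, pvInnerA, pvOuterA, hc]
      simpa using ih (pos + 1) pos (by omega) (by omega)
    · by_cases hc2 : c = ']'
      · simp [pvLoopB, pvInnerA, hc, hc2, hlast]
      · simp only [pvLoopB, pvInnerA, pvOuterA, if_neg hc]
        simp only [if_neg hc2]
        rw [if_neg (by exact fun h => hc2 h.1)]
        exact ih (pos + 1) last hlast (by omega)

theorem pvOuterA_eq_loopB (cs : List Char) : ∀ (pos : Int), 0 ≤ pos →
    pvOuterA cs pos = pvLoopB cs pos (-1) := by
  induction cs with
  | nil => intro pos _; simp [pvLoopB, pvOuterA]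
  | cons c rest ih =>
    intro pos hpos
    by_cases hc : c = '['
    · simp only [pvOuterA, pvLoopB, hc]
      exact (pvLoopB_pending rest (pos + 1) pos (by omega) (by omega)).symm
    · simp only [pvOuterA, pvLoopB, if_neg hc]
      rw [if_neg (by simp)]
      exact ih (pos + 1) (by omega)

-- ===== VERDICT (by name: the statement is the Claim_ definition above) =====
theorem GetFirstPair_spec : Claim_equal_GetFirstPair := by
  intro number _
  unfold Spec_GetFirstPair GetFirstPair GetFirstPair_alt
  exact pvOuterA_eq_loopB number.toList 0 (by omega)
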